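-- pv_equiv track=rewrite | github.com/LJuans0/PcProgramacion1 | May3H.py | pregunta_3
-- ===== SOURCE A (Python) =====
-- def pregunta_3(numerico: int) -> str:
--     """
--     Genera un codigo de barras basado en la cantidad de divisores de cada digito del numero ingresado.
--     Parametros:
--         numerico (int): Numero entero para generar el codigo de barras.
--     Retorna:
--         str: Una cadena que representa el codigo de barras "|", dependiendo de su cantidad de divisores.
--     """
--     digitos=numerico
--     codigo=""
--     divisores=0
--     for digito in str(digitos):
--         digitor = int(digito)
--         for i in range(2,digitor):
--             if digitor%i==0:
--                 divisores+=1
--                 codigo+="|"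
--         if divisores==0:
--             codigo+=" "
--         divisores=0
--     return codigo
-- ===== SOURCE B (Python) =====
-- def pregunta_3(numerico: int) -> str:
--     tabla = []
--     for d in range(10):
--         cuenta = sum(1 for i in range(2, d) if d % i == 0)
--         tabla.append('|' * cuenta if cuenta > 0 else ' ')
--     return ''.join(tabla[int(digito)] for digito in str(numerico))
-- ===== Notes on version B (the rewrite author's own statement) =====
-- stated objective: simpler
-- what changed: Replaces A's nested per-digit divisor-counting loop (with a running 'divisores' accumulator reset each iteration) by a table precomputed once for every possible decimal digit plus a single flat ''.join pass over the digit string.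
import Mathlib
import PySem

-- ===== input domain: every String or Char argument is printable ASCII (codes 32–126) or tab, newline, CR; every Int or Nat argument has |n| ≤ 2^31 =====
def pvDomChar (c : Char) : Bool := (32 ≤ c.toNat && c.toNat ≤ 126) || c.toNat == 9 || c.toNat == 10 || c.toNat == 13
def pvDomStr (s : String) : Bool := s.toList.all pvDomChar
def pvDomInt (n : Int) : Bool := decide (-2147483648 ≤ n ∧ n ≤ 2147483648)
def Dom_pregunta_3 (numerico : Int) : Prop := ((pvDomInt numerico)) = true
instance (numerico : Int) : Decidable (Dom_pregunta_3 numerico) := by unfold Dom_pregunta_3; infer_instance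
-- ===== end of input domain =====

-- B replaces A's nested per-digit divisor loop by a table precomputed once for every decimal digit plus one flat join pass (objective: simpler).

-- ===== PORT A =====
-- one loop-body step of A's 'for digito in str(digitos)', state = (codigo, divisores)
def pregunta3StepA (st : List Char × Int) (digito : Char) : List Char × Int :=
  -- int(digito); 'none' is Python's ValueError (e.g. the '-' of a negative number), excluded by Pre_
  let digitor : Int := (PySem.Int.ofChars? [digito]).getD 0
  let st := (PySem.List.pyRange 2 digitor).foldl
    (fun (st : List Char × Int) i =>
      if PySem.Int.mod digitor i == 0 then (st.1 ++ ['|'], st.2 + 1) else st) st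
  let st := if st.2 == 0 then (st.1 ++ [' '], st.2) else st
  (st.1, 0)  -- reset divisores

def pregunta_3 (numerico : Int) : String :=
  String.ofList (((PySem.Int.toChars numerico).foldl pregunta3StepA ([], 0)).1)

-- ===== PORT B =====
-- the precomputed table: one bar per divisor of the digit, a space when it has none
def pregunta3Tabla : List (List Char) :=
  (PySem.List.pyRange 0 10).map (fun d =>
    let cuenta := ((PySem.List.pyRange 2 d).filter (fun i => PySem.Int.mod d i == 0)).length
    if cuenta > 0 then List.replicate cuenta '|' else [' '])

def pregunta_3_alt (numerico : Int) : String :=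
  -- ''.join(tabla[int(digito)] for digito in str(numerico)); 'none' (int's ValueError / IndexError) cannot occur under Pre_
  String.ofList (PySem.Chars.join []
    ((PySem.Int.toChars numerico).map
      (fun digito => (PySem.List.pyGet? pregunta3Tabla ((PySem.Int.ofChars? [digito]).getD 0)).getD [])))

-- ===== PRECONDITION & SPEC =====
-- Pre_ excludes negative numerico, on which both Pythons raise ValueError (int('-') on the sign character).
def Pre_pregunta_3 (numerico : Int) : Prop := 0 ≤ numerico
instance (numerico : Int) : Decidable (Pre_pregunta_3 numerico) := by unfold Pre_pregunta_3; infer_instance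
def pvWitness_pregunta_3 : Int := (360)

def Spec_pregunta_3 (numerico : Int) (out : String) : Prop := out = pregunta_3_alt numerico
instance (numerico : Int) (out : String) : Decidable (Spec_pregunta_3 numerico out) := by unfold Spec_pregunta_3; infer_instance

-- ===== CLAIM (what is proved, stated in full; the proofs are below) =====
def Claim_equal_pregunta_3 : Prop := ∀ (numerico : Int), Dom_pregunta_3 numerico → Pre_pregunta_3 numerico → Spec_pregunta_3 numerico (pregunta_3 numerico)

-- ===== LEMMAS AND PROOFS =====

-- the ten digit characters
def pvDigits : List Char := ['0','1','2','3','4','5','6','7','8','9']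

-- every character str(n) produces for n ≥ 0 is a digit character
lemma toDigitsCore_mem (f n : Nat) (acc : List Char) (hacc : ∀ c ∈ acc, c ∈ pvDigits) :
    ∀ c ∈ Nat.toDigitsCore 10 f n acc, c ∈ pvDigits := by
  induction f generalizing n acc with
  | zero => simpa [Nat.toDigitsCore] using hacc
  | succ f ih =>
    have hd : Nat.digitChar (n % 10) ∈ pvDigits := by
      have h10 : n % 10 < 10 := Nat.mod_lt _ (by norm_num)
      interval_cases h : (n % 10) <;> simp [Nat.digitChar, pvDigits]
    simp only [Nat.toDigitsCore]
    split
    · intro c hc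
      rcases List.mem_cons.mp hc with h | h
      · exact h ▸ hd
      · exact hacc _ h
    · exact ih _ _ (by
        intro c hc
        rcases List.mem_cons.mp hc with h | h
        · exact h ▸ hd
        · exact hacc _ h)

lemma toChars_mem (n : Int) (hn : 0 ≤ n) : ∀ c ∈ PySem.Int.toChars n, c ∈ pvDigits := by
  have : ¬ n < 0 := not_lt.mpr hn
  simp only [PySem.Int.toChars, if_neg this, Nat.toDigits]
  exact toDigitsCore_mem _ _ _ (by simp)

-- A's inner divisor loop, from any accumulator: appends one bar per divisor and counts them
lemma innerA_eq (d : Int) :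
    ∀ (l : List Int) (acc : List Char) (k : Int),
      l.foldl (fun (st : List Char × Int) i =>
          if PySem.Int.mod d i == 0 then (st.1 ++ ['|'], st.2 + 1) else st) (acc, k)
      = (acc ++ List.replicate (l.filter (fun i => PySem.Int.mod d i == 0)).length '|',
         k + (l.filter (fun i => PySem.Int.mod d i == 0)).length) := by
  intro l
  induction l with
  | nil => intro acc k; simp
  | cons x xs ih =>
    intro acc k
    simp only [List.foldl_cons]
    by_cases hx : (PySem.Int.mod d x == 0) = true
    · rw [if_pos hx, ih]
      simp only [List.filter_cons, hx, if_pos, List.length_cons, List.replicate_succ,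
        List.append_assoc, List.singleton_append, Prod.mk.injEq, true_and]
      push_cast
      omega
    · rw [if_neg hx, ih]
      simp [hx]

-- A's step only appends to the accumulator
lemma stepA_shift (c : Char) (acc : List Char) :
    pregunta3StepA (acc, 0) c = (acc ++ (pregunta3StepA ([], 0) c).1, 0) := by
  simp only [pregunta3StepA, innerA_eq]
  split <;> simp

-- one step of A on a digit character equals B's table entry, from any accumulator
lemma stepA_entry (c : Char) (hc : c ∈ pvDigits) (acc : List Char) :
    pregunta3StepA (acc, 0) c
      = (acc ++ (PySem.List.pyGet? pregunta3Tabla ((PySem.Int.ofChars? [c]).getD 0)).getD [], 0) := by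
  fin_cases hc <;>
    (rw [stepA_shift]; exact congrArg (fun t => (acc ++ t, (0 : Int))) (by decide))

-- ''.join on List Char is flatten
lemma join_nil_flatten (l : List (List Char)) : PySem.Chars.join [] l = l.flatten := by
  induction l with
  | nil => simp [PySem.Chars.join, List.intercalate]
  | cons x xs ih =>
    cases xs with
    | nil => simp [PySem.Chars.join, List.intercalate]
    | cons y ys =>
      simp only [PySem.Chars.join, List.intercalate, List.intersperse, List.flatten] at *
      simp_all

-- A's whole fold over digit characters produces B's joined table entries
lemma foldA_eq (l : List Char) (hl : ∀ c ∈ l, c ∈ pvDigits) (acc : List Char) :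
    (l.foldl pregunta3StepA (acc, 0)).1
      = acc ++ PySem.Chars.join []
          (l.map (fun digito => (PySem.List.pyGet? pregunta3Tabla ((PySem.Int.ofChars? [digito]).getD 0)).getD [])) := by
  induction l generalizing acc with
  | nil => simp [join_nil_flatten]
  | cons c cs ih =>
    have hc : c ∈ pvDigits := hl c (List.mem_cons_self)
    have hcs : ∀ x ∈ cs, x ∈ pvDigits := fun x hx => hl x (List.mem_cons_of_mem _ hx)
    simp only [List.foldl_cons, stepA_entry c hc acc, List.map_cons]
    rw [ih hcs]
    simp [join_nil_flatten, List.append_assoc]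

-- ===== VERDICT (by name: the statement is the Claim_ definition above) =====
theorem pregunta_3_spec : Claim_equal_pregunta_3 := by
  intro n _ hpre
  unfold Spec_pregunta_3 pregunta_3 pregunta_3_alt
  rw [foldA_eq _ (toChars_mem n hpre) []]
  simp
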